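-- pv_equiv track=rewrite | github.com/zhoulittlezhou854-max/amazon-listing-skill | modules/capability_check.py | _check_dual_screen
-- ===== SOURCE A (Python) =====
-- from typing import Dict, List, Any, Tuple
--
-- def _check_dual_screen(attr: Dict[str, Any]) -> bool:
--     """检查双屏幕"""
--     if not attr:
--         return False
--
--     screen_fields = ["screen_type", "display", "屏幕", "屏幕类型", "dual_screen", "型号", "model", "form_factor"]
--
--     for field in screen_fields:
--         if field in attr:
--             screen = str(attr[field]).lower()
--             if any(keyword in screen for keyword in ["dual", "双屏", "前后屏", "double screen", "two", "前后"]):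
--                 return True
--
--     return False
-- ===== SOURCE B (Python) =====
-- from typing import Dict, List, Any, Tuple
--
-- _FIELD_SET = {"screen_type", "display", "屏幕", "屏幕类型", "dual_screen", "型号", "model", "form_factor"}
-- _KEYWORDS = ["dual", "双屏", "前后屏", "double screen", "two", "前后"]
--
-- def _check_dual_screen(attr: Dict[str, Any]) -> bool:
--     """检查双屏幕"""
--     for key, value in attr.items():
--         if key in _FIELD_SET:
--             text = str(value).lower()
--             if any(kw in text for kw in _KEYWORDS):
--                 return True
--     return False
-- ===== Notes on version B (the rewrite author's own statement) =====
-- stated objective: alternative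
-- what changed: B inverts the traversal: instead of looping over the fixed field list and probing the dict for each field, B makes a single pass over the dict's own items, testing each key for membership in a field set and scanning only that entry's lowered value; correct because the result is just the existence of a relevant (field, value) entry, independent of traversal order.
import Mathlib
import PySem

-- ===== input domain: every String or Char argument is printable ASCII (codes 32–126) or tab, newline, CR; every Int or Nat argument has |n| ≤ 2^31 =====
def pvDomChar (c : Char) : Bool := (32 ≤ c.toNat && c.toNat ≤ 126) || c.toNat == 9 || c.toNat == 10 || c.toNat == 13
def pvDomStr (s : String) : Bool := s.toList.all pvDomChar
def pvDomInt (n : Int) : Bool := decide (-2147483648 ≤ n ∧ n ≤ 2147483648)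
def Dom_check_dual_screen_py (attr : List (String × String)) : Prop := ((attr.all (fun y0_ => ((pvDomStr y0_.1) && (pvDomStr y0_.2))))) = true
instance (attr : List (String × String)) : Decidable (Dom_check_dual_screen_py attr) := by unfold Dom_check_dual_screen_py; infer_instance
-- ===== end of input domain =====

-- B inverts the traversal: one pass over the dict's own entries with a field-set membership test, instead of probing the dict for each field of a fixed list; same result proved (Pre_ excludes duplicate-key assoc lists, which represent no Python dict).


-- ===== PORT A =====
def pvScreenFields : List String :=
  ["screen_type", "display", "屏幕", "屏幕类型", "dual_screen", "型号", "model", "form_factor"]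

def pvKeywords : List String :=
  ["dual", "双屏", "前后屏", "double screen", "two", "前后"]

-- A: for each field of the fixed list present in attr, lower its value and test every keyword; early return = List.any.
def check_dual_screen_py (attr : List (String × String)) : Bool :=
  if attr.isEmpty then false
  else
    let d := PySem.Dict.mk attr
    pvScreenFields.any (fun field =>
      match d.get? field with
      | some v => pvKeywords.any (fun kw => PySem.Str.isIn kw (PySem.Str.lower v))
      | none => false)

-- ===== PORT B =====
-- B: the set of screen fields ('key in _FIELD_SET').
def pvFieldSet : PySem.Set String := PySem.Set.ofList pvScreenFields

-- B: single pass over the dict's items; for an entry whose key is in the field set, scan its lowered value; early return = List.any.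
def check_dual_screen_py_alt (attr : List (String × String)) : Bool :=
  attr.any (fun p =>
    pvFieldSet.contains p.1 &&
      pvKeywords.any (fun kw => PySem.Str.isIn kw (PySem.Str.lower p.2)))

-- ===== PRECONDITION & SPEC =====
-- Pre_ excludes association lists with duplicate keys: those represent no Python dict (A's first-match lookup vs B's scan of every entry would be an artefact of the encoding).
def Pre_check_dual_screen_py (attr : List (String × String)) : Prop :=
  (attr.map Prod.fst).Nodup
instance (attr : List (String × String)) : Decidable (Pre_check_dual_screen_py attr) := by unfold Pre_check_dual_screen_py; infer_instance

def pvWitness_check_dual_screen_py : (List (String × String)) := [("display", "Dual Screen"), ("model", "x1")]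

def Spec_check_dual_screen_py (attr : List (String × String)) (out : Bool) : Prop := out = check_dual_screen_py_alt attr
instance (attr : List (String × String)) (out : Bool) : Decidable (Spec_check_dual_screen_py attr out) := by unfold Spec_check_dual_screen_py; infer_instance

-- ===== CLAIM (what is proved, stated in full; the proofs are below) =====
def Claim_equal_check_dual_screen_py : Prop := ∀ (attr : List (String × String)), Dom_check_dual_screen_py attr → Pre_check_dual_screen_py attr → Spec_check_dual_screen_py attr (check_dual_screen_py attr)

-- ===== LEMMAS AND PROOFS =====

theorem pv_keys_mk (attr : List (String × String)) :
    (PySem.Dict.mk attr).keys = attr.map Prod.fst := rfl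

theorem pv_get?_some_iff (attr : List (String × String)) (hnd : (attr.map Prod.fst).Nodup)
    (f : String) (v : String) :
    (PySem.Dict.mk attr).get? f = some v ↔ (f, v) ∈ attr := by
  have := PySem.Dict.get?_eq_some_iff_mem_items (d := PySem.Dict.mk attr) (k := f) (v := v)
    (by rw [pv_keys_mk]; exact hnd)
  exact this

theorem check_dual_screen_py_spec : Claim_equal_check_dual_screen_py := by
  intro attr _ hnd
  unfold Spec_check_dual_screen_py check_dual_screen_py check_dual_screen_py_alt
  by_cases he : attr.isEmpty
  · rw [List.isEmpty_iff] at he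
    subst he
    simp
  · rw [if_neg he]
    rw [Bool.eq_iff_iff]
    simp only [List.any_eq_true, Bool.and_eq_true]
    constructor
    · rintro ⟨f, hf, hP⟩
      cases hget : (PySem.Dict.mk attr).get? f with
      | none => rw [hget] at hP; simp at hP
      | some v =>
        rw [hget] at hP
        refine ⟨(f, v), (pv_get?_some_iff attr hnd f v).mp hget, ?_, by simpa using hP⟩
        have hmem : f ∈ pvFieldSet := (PySem.Set.mem_ofList _ _).mpr hf
        simpa [List.contains_iff_mem] using hmem
    · rintro ⟨⟨k, v⟩, hmem, hk, hP⟩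
      have hkf : k ∈ pvScreenFields := by
        have : k ∈ pvFieldSet := by simpa [List.contains_iff_mem] using hk
        exact (PySem.Set.mem_ofList _ _).mp this
      refine ⟨k, hkf, ?_⟩
      rw [(pv_get?_some_iff attr hnd k v).mpr hmem]
      simpa using hP
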